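-- pv_equiv track=rewrite | github.com/GuilhermeBoia/graduation | p1/mtp/u8_1/q2/blefe.py | blefe
-- ===== SOURCE A (Python) =====
-- def blefe(lista):
--     compara = []
--     for e in lista:
--         compara.append(e)
--
--     for j in range(len(lista) -1):
--         if lista[j] < lista[j+1]:
--             lista[j+1] = lista[j]
--
--     diferenca = []
--     for i in range(len(compara)):
--         dif = compara[i] - lista[i]
--         diferenca.append(dif)
--
--     return diferenca
-- ===== SOURCE B (Python) =====
-- def blefe(lista):
--     # Divide and conquer: each answer is the element minus the minimum of its
--     # prefix; solve halves recursively, threading the left half's minimum into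
--     # the right half.  Note: A mutates `lista` into its prefix minima; B leaves
--     # the argument unchanged (return values are identical).
--     if not lista:
--         return []
--
--     def solve(xs, m):
--         # diffs of xs relative to running minimum m, plus the new minimum
--         if len(xs) == 1:
--             m2 = m if m < xs[0] else xs[0]
--             return [xs[0] - m2], m2
--         mid = len(xs) // 2
--         dl, ml = solve(xs[:mid], m)
--         dr, mr = solve(xs[mid:], ml)
--         return dl + dr, mr
--
--     d, _ = solve(lista, lista[0])
--     return d
-- ===== Notes on version B (the rewrite author's own statement) =====
-- stated objective: alternative
-- what changed: Replaces A's three sequential passes (copy, rewrite the list in place into prefix minima by pairwise index comparison, then subtract) by a divide-and-conquer recursion that solves each half and threads the left half's minimum into the right half; B does not mutate the argument (return values are identical).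
import Mathlib
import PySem

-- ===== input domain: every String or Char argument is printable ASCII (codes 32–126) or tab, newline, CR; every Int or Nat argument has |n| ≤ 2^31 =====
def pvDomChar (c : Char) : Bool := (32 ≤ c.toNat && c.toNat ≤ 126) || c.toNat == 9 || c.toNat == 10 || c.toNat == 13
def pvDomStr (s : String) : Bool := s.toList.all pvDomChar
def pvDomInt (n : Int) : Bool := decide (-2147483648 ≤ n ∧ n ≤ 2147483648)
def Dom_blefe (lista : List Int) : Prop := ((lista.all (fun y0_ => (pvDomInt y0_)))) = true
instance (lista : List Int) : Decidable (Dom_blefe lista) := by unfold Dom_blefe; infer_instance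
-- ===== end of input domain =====

-- B replaces A's three sequential passes by a divide-and-conquer recursion on halves
-- (objective: alternative). A mutates `lista` into its prefix minima, B leaves the
-- argument unchanged; the theorems here are about the return value.

-- ===== PORT A =====
def blefe (lista : List Int) : List Int :=
  let compara := lista.foldl (fun acc e => acc ++ [e]) []
  let lista1 := (PySem.List.pyRange 0 ((lista.length : Int) - 1) 1).foldl
    (fun l j =>
      if PySem.List.pyGetD l j 0 < PySem.List.pyGetD l (j + 1) 0 then
        PySem.List.pySetD l (j + 1) (PySem.List.pyGetD l j 0)
      else l) lista
  (PySem.List.pyRange 0 (compara.length : Int) 1).foldl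
    (fun acc i => acc ++ [PySem.List.pyGetD compara i 0 - PySem.List.pyGetD lista1 i 0]) []

-- ===== PORT B =====
-- `solve` from Source B.  Python's base case is len(xs) == 1 and blefe never calls
-- solve on []; the [] branch below is a totality guard for that unreachable case.
def altSolve (xs : List Int) (m : Int) : List Int × Int :=
  if xs.length ≤ 1 then
    match xs with
    | [] => ([], m)
    | x :: _ => let m2 := if m < x then m else x; ([x - m2], m2)
  else
    let mid := xs.length / 2
    let p1 := altSolve (PySem.List.slice xs none (some (mid : Int))) m
    let p2 := altSolve (PySem.List.slice xs (some (mid : Int)) none) p1.2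
    (p1.1 ++ p2.1, p2.2)
termination_by xs.length
decreasing_by
  · simp only [PySem.List.slice_to_natCast, List.length_take]; omega
  · simp only [PySem.List.slice_from_natCast, List.length_drop]; omega

def blefe_alt (lista : List Int) : List Int :=
  match lista with
  | [] => []
  | x :: _ => (altSolve lista x).1

-- ===== PRECONDITION & SPEC =====
def Spec_blefe (lista : List Int) (out : List Int) : Prop := out = blefe_alt lista
instance (lista : List Int) (out : List Int) : Decidable (Spec_blefe lista out) := by unfold Spec_blefe; infer_instance

-- ===== CLAIM (what is proved, stated in full; the proofs are below) =====
def Claim_equal_blefe : Prop := ∀ (lista : List Int), Dom_blefe lista → Spec_blefe lista (blefe lista)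

-- ===== LEMMAS AND PROOFS =====

-- prefix minima relative to a running minimum m
def pvPm (m : Int) : List Int → List Int
  | [] => []
  | x :: xs => min m x :: pvPm (min m x) xs

theorem pvPm_length (m : Int) (xs : List Int) : (pvPm m xs).length = xs.length := by
  induction xs generalizing m with
  | nil => rfl
  | cons x xs ih => simp [pvPm, ih]

theorem pvPm_append (m : Int) (xs : List Int) (z : Int) :
    pvPm m (xs ++ [z]) = pvPm m xs ++ [min (xs.foldl min m) z] := by
  induction xs generalizing m with
  | nil => simp [pvPm]
  | cons x xs ih => simp [pvPm, ih, List.foldl]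

theorem pvPm_append_gen (m : Int) (as bs : List Int) :
    pvPm m (as ++ bs) = pvPm m as ++ pvPm (as.foldl min m) bs := by
  induction as generalizing m with
  | nil => simp [pvPm]
  | cons a as ih => simp [pvPm, ih, List.foldl]

-- B side: altSolve computes the diffs against prefix minima and the total minimum
theorem altSolve_eq (n : Nat) : ∀ (xs : List Int), xs.length ≤ n → ∀ (m : Int),
    altSolve xs m = (xs.zipWith (· - ·) (pvPm m xs), xs.foldl min m) := by
  induction n with
  | zero =>
    intro xs h m
    have : xs = [] := List.eq_nil_of_length_eq_zero (Nat.le_zero.mp h)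
    subst this
    simp [altSolve, pvPm]
  | succ n ih =>
    intro xs h m
    by_cases h1 : xs.length ≤ 1
    · match xs with
      | [] => simp [altSolve, pvPm]
      | [x] =>
        simp [altSolve, pvPm, min_def]
        split_ifs with h2 h3 h3 <;> simp_all <;> omega
      | a :: b :: t => simp at h1
    · rw [altSolve.eq_def, if_neg h1]
      have hmid : xs.length / 2 < xs.length := by omega
      have hmid1 : 1 ≤ xs.length / 2 := by omega
      simp only [PySem.List.slice_to_natCast, PySem.List.slice_from_natCast]
      rw [ih (xs.take (xs.length / 2)) (by simp [List.length_take]; omega) m]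
      rw [ih (xs.drop (xs.length / 2)) (by simp [List.length_drop]; omega)]
      have hsplit : xs = xs.take (xs.length / 2) ++ xs.drop (xs.length / 2) :=
        (List.take_append_drop _ _).symm
      have hlen : (xs.take (xs.length / 2)).length = (pvPm m (xs.take (xs.length / 2))).length :=
        (pvPm_length _ _).symm
      refine Prod.ext ?_ ?_
      · show _ = xs.zipWith (· - ·) (pvPm m xs)
        conv_rhs => rw [hsplit, pvPm_append_gen, List.zipWith_append hlen]
      · show _ = xs.foldl min m
        conv_rhs => rw [hsplit, List.foldl_append]

theorem alt_eq (lista : List Int) :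
    blefe_alt lista = match lista with
      | [] => []
      | x :: _ => lista.zipWith (· - ·) (pvPm x lista) := by
  cases lista with
  | nil => rfl
  | cons x xs =>
    show (altSolve (x :: xs) x).1 = _
    rw [altSolve_eq (x :: xs).length (x :: xs) (le_refl _) x]

-- A side: the pairwise rewrite loop computes prefix minima
theorem a_loop (x : Int) (xs : List Int) (k : Nat) (hk : k ≤ xs.length) :
    (PySem.List.pyRange 0 (k : Int) 1).foldl
      (fun l j =>
        if PySem.List.pyGetD l j 0 < PySem.List.pyGetD l (j + 1) 0 then
          PySem.List.pySetD l (j + 1) (PySem.List.pyGetD l j 0)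
        else l) (x :: xs) =
    pvPm x ((x :: xs).take (k + 1)) ++ (x :: xs).drop (k + 1) := by
  induction k with
  | zero => simp [PySem.List.pyRange_one_eq_nil, pvPm]
  | succ k ih =>
    have hk' : k ≤ xs.length := Nat.le_of_succ_le hk
    have hcast : ((k + 1 : Nat) : Int) = (k : Int) + 1 := by push_cast; ring
    rw [hcast, PySem.List.pyRange_one_succ_right (by omega), List.foldl_append, ih hk']
    set l : List Int := x :: xs with hl
    have hlen : l.length = xs.length + 1 := by simp [hl]
    have hk1 : k + 1 < l.length := by omega
    have htake : l.take (k + 1 + 1) = l.take (k + 1) ++ [l[k + 1]] := by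
      rw [List.take_add_one]; simp [hk1]
    have hplen : (pvPm x (l.take (k + 1))).length = k + 1 := by
      rw [pvPm_length, List.length_take]; omega
    have hdrop : l.drop (k + 1) = l[k + 1] :: l.drop (k + 1 + 1) := by
      exact (List.drop_eq_getElem_cons hk1)
    set P := pvPm x (l.take (k + 1)) with hP
    set a := (l.take (k + 1)).foldl min x with ha
    have htake' : l.take (k + 1) = l.take k ++ [l[k]] := by
      rw [List.take_add_one]; simp [show k < l.length by omega]
    have hPk : P = pvPm x (l.take k) ++ [min ((l.take k).foldl min x) l[k]] := by
      rw [hP, htake', pvPm_append]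
    have hsub : a = min ((l.take k).foldl min x) l[k] := by
      rw [ha, htake', List.foldl_append]; simp
    have hgetk : PySem.List.pyGetD (P ++ l.drop (k + 1)) (k : Int) 0 = a := by
      rw [PySem.List.pyGetD_natCast, hPk]
      have hlen' : (pvPm x (l.take k)).length = k := by
        rw [pvPm_length, List.length_take]; omega
      rw [List.append_assoc, List.getD_eq_getElem?_getD, List.getElem?_append_right (by omega)]
      simp [hlen', hsub]
    have hgetk1 : PySem.List.pyGetD (P ++ l.drop (k + 1)) ((k : Int) + 1) 0 = l[k + 1] := by
      have hc : ((k : Int) + 1) = ((k + 1 : Nat) : Int) := by omega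
      rw [hc, PySem.List.pyGetD_natCast, List.getD_eq_getElem?_getD,
          List.getElem?_append_right (by omega), hplen, Nat.sub_self, hdrop]
      rfl
    show (if PySem.List.pyGetD (P ++ l.drop (k + 1)) (k : Int) 0 <
            PySem.List.pyGetD (P ++ l.drop (k + 1)) ((k : Int) + 1) 0 then
          PySem.List.pySetD (P ++ l.drop (k + 1)) ((k : Int) + 1)
            (PySem.List.pyGetD (P ++ l.drop (k + 1)) (k : Int) 0)
         else P ++ l.drop (k + 1)) = pvPm x (l.take (k + 1 + 1)) ++ l.drop (k + 1 + 1)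
    rw [hgetk, hgetk1, htake, pvPm_append, ← ha, ← hP]
    by_cases hab : a < l[k + 1]
    · rw [if_pos hab, min_eq_left (le_of_lt hab)]
      have hc : ((k : Int) + 1) = ((k + 1 : Nat) : Int) := by omega
      rw [hc, PySem.List.pySetD_natCast, hdrop, List.set_append,
          if_neg (by omega), hplen, Nat.sub_self]
      simp
      rw [hdrop]
      rfl
    · rw [if_neg hab, min_eq_right (le_of_not_gt hab), hdrop]
      simp

-- the subtraction loop is zipWith
theorem diff_loop (as bs : List Int) (h : bs.length = as.length) :
    (PySem.List.pyRange 0 (as.length : Int) 1).foldl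
      (fun acc i => acc ++ [PySem.List.pyGetD as i 0 - PySem.List.pyGetD bs i 0]) [] =
    as.zipWith (· - ·) bs := by
  rw [PySem.List.foldl_append_singleton_eq_map]
  apply List.ext_getElem
  · simp [PySem.List.length_pyRange_one, h]
  · intro j h1 h2
    simp only [List.nil_append] at h1 ⊢
    have hj : j < as.length := by
      simpa [PySem.List.length_pyRange_one] using h1
    rw [List.getElem_map, PySem.List.getElem_pyRange_one]
    have : (0 : Int) + (j : Int) = ((j : Nat) : Int) := by omega
    rw [this, PySem.List.pyGetD_natCast, PySem.List.pyGetD_natCast]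
    rw [List.getD_eq_getElem?_getD, List.getD_eq_getElem?_getD,
        List.getElem?_eq_getElem hj, List.getElem?_eq_getElem (by omega)]
    simp [List.getElem_zipWith]

theorem a_eq (lista : List Int) :
    blefe lista = match lista with
      | [] => []
      | x :: _ => lista.zipWith (· - ·) (pvPm x lista) := by
  cases lista with
  | nil => rfl
  | cons x xs =>
    unfold blefe
    rw [PySem.List.foldl_append_singleton_eq_self]
    simp only [List.nil_append]
    have hcast : (((x :: xs).length : Int) - 1) = ((xs.length : Nat) : Int) := by
      push_cast [List.length_cons]; ring
    rw [hcast, a_loop x xs xs.length (le_refl _)]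
    have : (x :: xs).take (xs.length + 1) = x :: xs := by
      apply List.take_of_length_le; simp
    rw [this, List.drop_eq_nil_of_le (by simp), List.append_nil]
    exact diff_loop (x :: xs) (pvPm x (x :: xs)) (pvPm_length _ _)

-- ===== VERDICT (by name: the statement is the Claim_ definition above) =====
theorem blefe_spec : Claim_equal_blefe := by
  intro lista _
  unfold Spec_blefe
  rw [a_eq, alt_eq]
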